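-- pv_equiv track=rewrite | github.com/AGunasekera/DPhil | COSCC/Wick.py | genPairOrderedLists
-- ===== SOURCE A (Python) =====
-- def genPairOrderedLists(list_):
--     '''
--     Given an ordered list with an even number of elements, returns list of all permutations of that list where each adjacent pair is ordered, and where the first elements of pairs are ordered
--     '''
--     pairOrderedLists = []
--     if len(list_) == 2:
--         pairOrderedLists.append(list_)
--     else:
--         for i in range(1,len(list_)):
--             swappedList = [list_[0]] + [list_[i]] + list_[1:i]
--             if i < len(list_):
--                 swappedList = swappedList + list_[i+1:]
--             subLists = genPairOrderedLists(swappedList[2:])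
--             for l in range(len(subLists)):
--                 pairOrderedLists.append(swappedList[:2] + subLists[l])
--     return pairOrderedLists
-- ===== SOURCE B (Python) =====
-- def genPairOrderedLists(list_):
--     # Level-synchronous (BFS) expansion of (prefix, remaining) states instead of recursion.
--     frontier = [([], list(list_))]
--     for _ in range(max(0, (len(list_) - 2) // 2)):
--         new_frontier = []
--         for prefix, rem in frontier:
--             for i in range(1, len(rem)):
--                 new_frontier.append((prefix + [rem[0], rem[i]], rem[1:i] + rem[i + 1:]))
--         frontier = new_frontier
--     return [prefix + rem for prefix, rem in frontier if len(rem) == 2]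
-- ===== Notes on version B (the rewrite author's own statement) =====
-- stated objective: alternative
-- what changed: Replaces A's depth-first recursion with an iterative level-synchronous (BFS) expansion of (prefix, remaining) states, emitting prefix+remaining for the final level; same enumeration order.
import Mathlib
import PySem

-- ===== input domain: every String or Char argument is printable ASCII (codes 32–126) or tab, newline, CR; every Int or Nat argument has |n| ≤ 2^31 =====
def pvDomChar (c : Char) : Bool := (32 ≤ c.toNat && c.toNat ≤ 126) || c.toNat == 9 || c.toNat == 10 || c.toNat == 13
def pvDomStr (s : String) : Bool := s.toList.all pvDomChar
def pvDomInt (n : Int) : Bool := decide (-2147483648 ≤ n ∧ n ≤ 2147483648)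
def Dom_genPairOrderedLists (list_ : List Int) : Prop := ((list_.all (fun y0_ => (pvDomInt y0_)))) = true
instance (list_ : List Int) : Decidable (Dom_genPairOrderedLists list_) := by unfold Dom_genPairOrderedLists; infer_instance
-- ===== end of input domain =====

-- B replaces A's depth-first recursion by an iterative level-synchronous (BFS) expansion
-- of (prefix, remaining) states; same output, same order ("alternative" objective).

-- ===== PORT A =====
-- length facts about the slices, cited by the port's decreasing_by
theorem pv_slice1_len (r : List Int) (i : Int) (h1 : 1 ≤ i) (h2 : i < (r.length : Int)) :
    (PySem.List.slice r (some 1) (some i)).length = i.toNat - 1 := by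
  rw [PySem.List.slice_toNat r (by norm_num) (by omega)]
  simp
  omega

theorem pv_slice2_len (r : List Int) (i : Int) (h1 : 1 ≤ i) (h2 : i < (r.length : Int)) :
    (PySem.List.slice r (some (i + 1)) none).length = r.length - (i.toNat + 1) := by
  rw [PySem.List.slice_from r (by omega)]
  simp
  omega

theorem pv_swapped_drop2_len (r : List Int) (a b i : Int) (h1 : 1 ≤ i) (h2 : i < (r.length : Int)) :
    (PySem.List.slice (([a] ++ [b] ++ PySem.List.slice r (some 1) (some i))
        ++ PySem.List.slice r (some (i + 1)) none) (some 2) none).length < r.length := by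
  rw [PySem.List.slice_from _ (by norm_num)]
  simp [pv_slice1_len r i h1 h2, pv_slice2_len r i h1 h2]
  omega

-- Literal port of A's recursion; indexing list_[0]/list_[i] is in range inside the loop
-- (1 ≤ i < len list_), so pyGetD with default 0 is exact there.
def genPairOrderedLists (list_ : List Int) : List (List Int) :=
  if list_.length = 2 then [list_]
  else
    ((PySem.List.pyRange 1 (list_.length : Int) 1).attach).foldl
      (fun acc i =>
        let swappedList := [PySem.List.pyGetD list_ 0 0] ++ [PySem.List.pyGetD list_ i.1 0]
            ++ PySem.List.slice list_ (some 1) (some i.1)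
        let swappedList := if i.1 < (list_.length : Int) then
            swappedList ++ PySem.List.slice list_ (some (i.1 + 1)) none
          else swappedList
        let subLists := genPairOrderedLists (PySem.List.slice swappedList (some 2) none)
        -- 'for l in range(len(subLists)): append(swappedList[:2] + subLists[l])'
        acc ++ subLists.map (fun l => PySem.List.slice swappedList none (some 2) ++ l))
      []
termination_by list_.length
decreasing_by
  have h := (PySem.List.mem_pyRange_one).mp i.2
  rw [dif_pos h.2]
  exact pv_swapped_drop2_len list_ _ _ i.1 h.1 h.2

-- ===== PORT B =====
-- children of one (prefix, remaining) state, in B's inner-loop order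
def pvExpand (st : List Int × List Int) : List (List Int × List Int) :=
  (PySem.List.pyRange 1 (st.2.length : Int) 1).foldl
    (fun acc i =>
      acc ++ [(st.1 ++ [PySem.List.pyGetD st.2 0 0, PySem.List.pyGetD st.2 i 0],
               PySem.List.slice st.2 (some 1) (some i) ++ PySem.List.slice st.2 (some (i + 1)) none)])
    []

def genPairOrderedLists_alt (list_ : List Int) : List (List Int) :=
  let steps := max 0 (PySem.Int.floordiv ((list_.length : Int) - 2) 2)
  let frontier := (List.range steps.toNat).foldl
    (fun fr _ => fr.foldl (fun acc st => acc ++ pvExpand st) []) [([], list_)]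
  (frontier.filter (fun st => st.2.length == 2)).map (fun st => st.1 ++ st.2)

-- ===== PRECONDITION & SPEC =====
def Spec_genPairOrderedLists (list_ : List Int) (out : List (List Int)) : Prop := out = genPairOrderedLists_alt list_
instance (list_ : List Int) (out : List (List Int)) : Decidable (Spec_genPairOrderedLists list_ out) := by unfold Spec_genPairOrderedLists; infer_instance

-- ===== CLAIM (what is proved, stated in full; the proofs are below) =====
def Claim_equal_genPairOrderedLists : Prop := ∀ (list_ : List Int), Dom_genPairOrderedLists list_ → Spec_genPairOrderedLists list_ (genPairOrderedLists list_)

-- ===== LEMMAS AND PROOFS =====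

-- the first pair and the rest that A's loop body builds for index i
def pvFirst2 (r : List Int) (i : Int) : List Int :=
  [PySem.List.pyGetD r 0 0, PySem.List.pyGetD r i 0]

def pvRest (r : List Int) (i : Int) : List Int :=
  PySem.List.slice r (some 1) (some i) ++ PySem.List.slice r (some (i + 1)) none

-- output of A's recursion from a (prefix, remaining) state
def pvF (st : List Int × List Int) : List (List Int) :=
  (genPairOrderedLists st.2).map (st.1 ++ ·)

theorem pv_rest_length (r : List Int) (i : Int) (h1 : 1 ≤ i) (h2 : i < (r.length : Int)) :
    (pvRest r i).length = r.length - 2 := by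
  simp [pvRest, pv_slice1_len r i h1 h2, pv_slice2_len r i h1 h2]
  omega

theorem pv_gen_eq (r : List Int) (h : r.length ≠ 2) :
    genPairOrderedLists r = (PySem.List.pyRange 1 (r.length : Int) 1).flatMap
      (fun i => (genPairOrderedLists (pvRest r i)).map (fun l => pvFirst2 r i ++ l)) := by
  rw [genPairOrderedLists.eq_def, if_neg h]
  refine (PySem.List.foldl_congr_mem' _ _
      (fun acc (x : {x // x ∈ PySem.List.pyRange 1 (r.length : Int) 1}) =>
        acc ++ (genPairOrderedLists (pvRest r x.1)).map (fun l => pvFirst2 r x.1 ++ l)) _ ?_).trans ?_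
  case refine_2 =>
    rw [List.foldl_attach (f := fun acc v =>
        acc ++ (genPairOrderedLists (pvRest r v)).map (fun l => pvFirst2 r v ++ l)),
      PySem.List.foldl_append_eq_flatMap]
    simp
  case refine_1 =>
    intro x hx acc
    have hb := (PySem.List.mem_pyRange_one).mp x.2
    simp only [if_pos hb.2]
    have e1 : PySem.List.slice (([PySem.List.pyGetD r 0 0] ++ [PySem.List.pyGetD r x.1 0]
          ++ PySem.List.slice r (some 1) (some x.1))
          ++ PySem.List.slice r (some (x.1 + 1)) none) (some 2) none = pvRest r x.1 := by
      rw [PySem.List.slice_from _ (by norm_num)]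
      simp [pvRest]
    have e2 : PySem.List.slice (([PySem.List.pyGetD r 0 0] ++ [PySem.List.pyGetD r x.1 0]
          ++ PySem.List.slice r (some 1) (some x.1))
          ++ PySem.List.slice r (some (x.1 + 1)) none) none (some 2) = pvFirst2 r x.1 := by
      rw [PySem.List.slice_to _ (by norm_num)]
      simp [pvFirst2]
    rw [e1, e2]

theorem pv_gen_two (r : List Int) (h : r.length = 2) : genPairOrderedLists r = [r] := by
  rw [genPairOrderedLists.eq_def, if_pos h]

theorem pv_gen_small (r : List Int) (h : r.length < 2) : genPairOrderedLists r = [] := by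
  rw [genPairOrderedLists.eq_def, if_neg (by omega)]
  rw [PySem.List.pyRange_one_eq_nil (by omega)]
  simp

theorem pv_gen_three (r : List Int) (h : r.length = 3) : genPairOrderedLists r = [] := by
  rw [pv_gen_eq r (by omega)]
  rw [List.flatMap_eq_nil_iff.mpr]
  intro i hi
  have hb := (PySem.List.mem_pyRange_one).mp hi
  have : (pvRest r i).length = 1 := by rw [pv_rest_length r i hb.1 (by omega)]; omega
  rw [pv_gen_small _ (by omega)]
  simp

theorem pv_expand_eq (st : List Int × List Int) :
    pvExpand st = (PySem.List.pyRange 1 (st.2.length : Int) 1).map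
      (fun i => (st.1 ++ pvFirst2 st.2 i, pvRest st.2 i)) := by
  unfold pvExpand
  rw [PySem.List.foldl_append_singleton_eq_map]
  simp [pvFirst2, pvRest]

theorem pv_step (st : List Int × List Int) (h : st.2.length ≠ 2) :
    pvF st = (pvExpand st).flatMap pvF := by
  unfold pvF
  rw [pv_gen_eq st.2 h, pv_expand_eq]
  rw [List.map_flatMap, List.flatMap_map]
  congr 1
  funext i
  simp [List.map_map, Function.comp_def, List.append_assoc]

theorem pv_level (fr : List (List Int × List Int)) (h : ∀ st ∈ fr, st.2.length ≠ 2) :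
    (fr.flatMap pvExpand).flatMap pvF = fr.flatMap pvF := by
  induction fr with
  | nil => simp
  | cons st tl ih =>
    simp only [List.flatMap_cons, List.flatMap_append]
    rw [ih (fun s hs => h s (List.mem_cons_of_mem _ hs)),
        ← pv_step st (h st (List.mem_cons_self))]

theorem pv_level_len (fr : List (List Int × List Int)) (L : Nat)
    (h : ∀ st ∈ fr, st.2.length = L) :
    ∀ st' ∈ fr.flatMap pvExpand, st'.2.length = L - 2 := by
  intro st' hst'
  rw [List.mem_flatMap] at hst'
  obtain ⟨st, hst, hmem⟩ := hst'
  rw [pv_expand_eq, List.mem_map] at hmem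
  obtain ⟨i, hi, rfl⟩ := hmem
  have hb := (PySem.List.mem_pyRange_one).mp hi
  have hL := h st hst
  rw [pv_rest_length st.2 i hb.1 hb.2, hL]

def pvIter (k : Nat) (fr : List (List Int × List Int)) : List (List Int × List Int) :=
  (List.range k).foldl (fun fr _ => fr.foldl (fun acc st => acc ++ pvExpand st) []) fr

theorem pv_iter_succ (k : Nat) (fr : List (List Int × List Int)) :
    pvIter (k + 1) fr = (pvIter k fr).flatMap pvExpand := by
  unfold pvIter
  rw [List.range_succ, List.foldl_append]
  simp only [List.foldl_cons, List.foldl_nil]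
  rw [PySem.List.foldl_append_eq_flatMap]
  simp

theorem pv_iter_inv (k : Nat) (L : Nat) (fr : List (List Int × List Int))
    (hlen : ∀ st ∈ fr, st.2.length = L) (hk : 2 * k < L) :
    (pvIter k fr).flatMap pvF = fr.flatMap pvF ∧
    ∀ st ∈ pvIter k fr, st.2.length = L - 2 * k := by
  induction k with
  | zero => exact ⟨rfl, by simpa [pvIter] using hlen⟩
  | succ k ih =>
    obtain ⟨ih1, ih2⟩ := ih (by omega)
    rw [pv_iter_succ]
    constructor
    · rw [pv_level _ (fun st hst => by rw [ih2 st hst]; omega), ih1]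
    · intro st hst
      have := pv_level_len (pvIter k fr) (L - 2 * k) ih2 st hst
      omega

theorem pv_flatMap_two (fr : List (List Int × List Int)) (h : ∀ st ∈ fr, st.2.length = 2) :
    fr.flatMap pvF = fr.map (fun st => st.1 ++ st.2) := by
  induction fr with
  | nil => simp
  | cons st tl ih =>
    simp only [List.flatMap_cons, List.map_cons]
    rw [ih (fun s hs => h s (List.mem_cons_of_mem _ hs))]
    unfold pvF
    rw [pv_gen_two st.2 (h st List.mem_cons_self)]
    simp

theorem pv_flatMap_three (fr : List (List Int × List Int)) (h : ∀ st ∈ fr, st.2.length = 3) :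
    fr.flatMap pvF = [] := by
  rw [List.flatMap_eq_nil_iff]
  intro st hst
  unfold pvF
  rw [pv_gen_three st.2 (h st hst)]
  simp

-- ===== VERDICT (by name: the statement is the Claim_ definition above) =====
theorem genPairOrderedLists_spec : Claim_equal_genPairOrderedLists := by
  intro list_ _
  unfold Spec_genPairOrderedLists
  simp only [genPairOrderedLists_alt]
  have hK : (max 0 (PySem.Int.floordiv ((list_.length : Int) - 2) 2)).toNat
      = (list_.length - 2) / 2 := by
    rw [PySem.Int.floordiv_eq_ediv_of_pos (by norm_num)]
    omega
  rw [hK]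
  have hIter : (List.range ((list_.length - 2) / 2)).foldl
      (fun fr _ => fr.foldl (fun acc st => acc ++ pvExpand st) []) [([], list_)]
      = pvIter ((list_.length - 2) / 2) [([], list_)] := rfl
  rw [hIter]
  by_cases h2 : list_.length < 2
  · have hK0 : (list_.length - 2) / 2 = 0 := by omega
    rw [hK0]
    have h0 : pvIter 0 [([], list_)] = [([], list_)] := rfl
    rw [h0, pv_gen_small list_ h2]
    have : (list_.length == 2) = false := by simp; omega
    simp [List.filter, this]
  · have hbase : [(([] : List Int), list_)].flatMap pvF = genPairOrderedLists list_ := by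
      simp [pvF]
    obtain ⟨hflat, hlen⟩ := pv_iter_inv ((list_.length - 2) / 2) list_.length [([], list_)]
      (by intro st hst; simp at hst; rw [hst]) (by omega)
    by_cases hev : list_.length % 2 = 0
    · have hL2 : ∀ st ∈ pvIter ((list_.length - 2) / 2) [([], list_)], st.2.length = 2 := by
        intro st hst; rw [hlen st hst]; omega
      rw [List.filter_eq_self.mpr (by intro st hst; simpa using hL2 st hst)]
      have hm := pv_flatMap_two _ hL2
      rw [hflat, hbase] at hm
      exact hm
    · have hL3 : ∀ st ∈ pvIter ((list_.length - 2) / 2) [([], list_)], st.2.length = 3 := by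
        intro st hst; rw [hlen st hst]; omega
      rw [List.filter_eq_nil_iff.mpr (by intro st hst; simp [hL3 st hst])]
      have hm := pv_flatMap_three _ hL3
      rw [hflat, hbase] at hm
      simp [← hm]
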